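-- pv_equiv track=rewrite | github.com/zyueek/Impersonation-and-Commit-Author-Attribution | adversial/token_transforms.py | _compute_skip_spans
-- ===== SOURCE A (Python) =====
-- def _compute_skip_spans(text: str, lang: str) -> list[tuple[int, int]]:
--     """
--     Returns spans to skip (strings/comments). Best-effort for C-like and PHP/JS/Go/Java.
--     """
--     spans: list[tuple[int, int]] = []
--     i = 0
--     n = len(text)
--     lang = (lang or "").lower()
--     while i < n:
--         ch = text[i]
--         nxt = text[i + 1] if i + 1 < n else ""
--
--         # Line comments: // ... or # ... (php)
--         if ch == "/" and nxt == "/":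
--             j = i + 2
--             while j < n and text[j] != "\n":
--                 j += 1
--             spans.append((i, j))
--             i = j
--             continue
--         if lang in {"php"} and ch == "#":
--             j = i + 1
--             while j < n and text[j] != "\n":
--                 j += 1
--             spans.append((i, j))
--             i = j
--             continue
--
--         # Block comments: /* ... */
--         if ch == "/" and nxt == "*":
--             j = i + 2
--             while j + 1 < n and not (text[j] == "*" and text[j + 1] == "/"):
--                 j += 1
--             j = min(n, j + 2)
--             spans.append((i, j))
--             i = j
--             continue
--
--         # Strings: '...' and "..." with backslash escapes.
--         if ch in {"'", '"'}:
--             quote = ch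
--             j = i + 1
--             while j < n:
--                 if text[j] == "\\":
--                     j += 2
--                     continue
--                 if text[j] == quote:
--                     j += 1
--                     break
--                 j += 1
--             spans.append((i, min(n, j)))
--             i = j
--             continue
--
--         # Backtick strings for js/go
--         if ch == "`" and lang in {"js", "go"}:
--             j = i + 1
--             while j < n:
--                 if text[j] == "\\":
--                     j += 2
--                     continue
--                 if text[j] == "`":
--                     j += 1
--                     break
--                 j += 1
--             spans.append((i, min(n, j)))
--             i = j
--             continue
--
--         i += 1
--
--     spans.sort()
--     return spans
-- ===== SOURCE B (Python) =====
-- def _enter(pos, c, hash_ok, tick_ok):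
--     # state entered when char c at pos is seen in plain code
--     if c == "/":
--         return ("/", pos)
--     if hash_ok and c == "#":
--         return ("c", pos)
--     if c in "'\"" or (tick_ok and c == "`"):
--         return ("s", pos, c, False)
--     return ("n",)
--
--
-- def _compute_skip_spans(text: str, lang: str) -> list[tuple[int, int]]:
--     lang = (lang or "").lower()
--     hash_ok = lang == "php"
--     tick_ok = lang in ("js", "go")
--     spans: list[tuple[int, int]] = []
--     st = ("n",)  # ("n",) plain | ("/",s) pending slash | ("c",s) line comment | ("b",s,star) block | ("s",s,q,esc) string
--     for pos, c in enumerate(text):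
--         k = st[0]
--         if k == "n":
--             st = _enter(pos, c, hash_ok, tick_ok)
--         elif k == "/":
--             if c == "/":
--                 st = ("c", st[1])
--             elif c == "*":
--                 st = ("b", st[1], False)
--             else:
--                 st = _enter(pos, c, hash_ok, tick_ok)
--         elif k == "c":
--             if c == "\n":
--                 spans.append((st[1], pos))
--                 st = ("n",)
--         elif k == "b":
--             if st[2] and c == "/":
--                 spans.append((st[1], pos + 1))
--                 st = ("n",)
--             else:
--                 st = ("b", st[1], c == "*")
--         else:  # "s"
--             if st[3]:
--                 st = ("s", st[1], st[2], False)
--             elif c == "\\":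
--                 st = ("s", st[1], st[2], True)
--             elif c == st[2]:
--                 spans.append((st[1], pos + 1))
--                 st = ("n",)
--     if st[0] in ("c", "b", "s"):
--         spans.append((st[1], len(text)))
--     return spans
-- ===== Notes on version B (the rewrite author's own statement) =====
-- stated objective: alternative
-- what changed: B replaces A's nested scanning loops with manual index jumps plus a final sort by a single character-at-a-time DFA fold over enumerate(text) carrying an explicit state (plain / pending-slash / line-comment / block-comment / string-with-escape-flag) that emits spans already in order, with an end-of-input flush for unterminated spans.
import Mathlib
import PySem

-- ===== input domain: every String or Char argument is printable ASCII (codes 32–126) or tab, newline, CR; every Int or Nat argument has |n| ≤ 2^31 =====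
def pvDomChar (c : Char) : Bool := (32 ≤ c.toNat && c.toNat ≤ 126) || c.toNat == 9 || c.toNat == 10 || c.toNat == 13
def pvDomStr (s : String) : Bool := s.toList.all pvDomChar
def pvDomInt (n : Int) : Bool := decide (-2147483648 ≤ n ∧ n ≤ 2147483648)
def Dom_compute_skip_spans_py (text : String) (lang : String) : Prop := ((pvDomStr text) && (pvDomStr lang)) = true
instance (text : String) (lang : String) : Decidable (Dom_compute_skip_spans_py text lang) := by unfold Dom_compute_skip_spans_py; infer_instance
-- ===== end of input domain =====

-- B replaces A's nested scanning loops (with index jumps and a final sort) by a single character-at-a-time DFA fold with an explicit state; return value only.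


-- ===== PORT A =====
-- A's inline `while j < n and text[j] != '\n'` loop (used by both line-comment branches).
def aScanLine (cs : List Char) (j : Nat) : Nat :=
  if j < cs.length ∧ cs[j]? ≠ some '\n' then aScanLine cs (j + 1) else j
termination_by cs.length - j
decreasing_by omega

-- A's `while j + 1 < n and not (text[j] == '*' and text[j+1] == '/')` loop.
def aScanBlock (cs : List Char) (j : Nat) : Nat :=
  if j + 1 < cs.length ∧ ¬(cs[j]? = some '*' ∧ cs[j + 1]? = some '/') then aScanBlock cs (j + 1)
  else j
termination_by cs.length - j
decreasing_by omega

-- A's string-scanning `while j < n: if text[j]=='\\': j+=2 … ` loop (used by both string branches).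
def aScanStr (cs : List Char) (quote : Char) (j : Nat) : Nat :=
  if h : j < cs.length then
    if cs[j]? = some '\\' then aScanStr cs quote (j + 2)
    else if cs[j]? = some quote then j + 1
    else aScanStr cs quote (j + 1)
  else j
termination_by cs.length - j
decreasing_by all_goals omega

theorem aScanLine_ge (cs : List Char) (j : Nat) : j ≤ aScanLine cs j := by
  fun_induction aScanLine cs j <;> omega

theorem aScanBlock_ge (cs : List Char) (j : Nat) : j ≤ aScanBlock cs j := by
  fun_induction aScanBlock cs j <;> omega

theorem aScanStr_ge (cs : List Char) (quote : Char) (j : Nat) : j ≤ aScanStr cs quote j := by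
  fun_induction aScanStr cs quote j <;> omega

-- A's main `while i < n` loop; `cs[i+1]? = some c` ports `nxt == c` (nxt = "" out of range never equals a char).
def aLoop (cs ls : List Char) (i : Nat) (spans : List (Int × Int)) : List (Int × Int) :=
  if hi : i < cs.length then
    if cs[i]? = some '/' ∧ cs[i + 1]? = some '/' then
      let j := aScanLine cs (i + 2)
      aLoop cs ls j (spans ++ [((i : Int), (j : Int))])
    else if ls = ['p', 'h', 'p'] ∧ cs[i]? = some '#' then
      let j := aScanLine cs (i + 1)
      aLoop cs ls j (spans ++ [((i : Int), (j : Int))])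
    else if cs[i]? = some '/' ∧ cs[i + 1]? = some '*' then
      let j := min cs.length (aScanBlock cs (i + 2) + 2)
      aLoop cs ls j (spans ++ [((i : Int), (j : Int))])
    else if cs[i]? = some '\'' ∨ cs[i]? = some '"' then
      let quote := if cs[i]? = some '\'' then '\'' else '"'
      let j := aScanStr cs quote (i + 1)
      aLoop cs ls j (spans ++ [((i : Int), ((min cs.length j : Nat) : Int))])
    else if cs[i]? = some '`' ∧ (ls = ['j', 's'] ∨ ls = ['g', 'o']) then
      let j := aScanStr cs '`' (i + 1)
      aLoop cs ls j (spans ++ [((i : Int), ((min cs.length j : Nat) : Int))])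
    else aLoop cs ls (i + 1) spans
  else spans
termination_by cs.length - i
decreasing_by
  · have := aScanLine_ge cs (i + 2); omega
  · have := aScanLine_ge cs (i + 1); omega
  · have := aScanBlock_ge cs (i + 2); omega
  · split <;> rename_i hsp <;>
      [(have := aScanStr_ge cs '\'' (i + 1); omega); (have := aScanStr_ge cs '"' (i + 1); omega)]
  · have := aScanStr_ge cs '`' (i + 1); omega
  · omega

-- `(lang or "").lower()` = `lang.lower()` on strings; `spans.sort()` sorts by Python tuple order = lexicographic.
def compute_skip_spans_py (text : String) (lang : String) : List (Int × Int) :=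
  PySem.List.sorted (aLoop text.toList (PySem.Chars.lower lang.toList) 0 [])
    (fun p => (toLex p : Lex (Int × Int)))

-- ===== PORT B =====
-- B's DFA states: plain code / pending '/' / line comment / block comment (star = previous char was '*') / string (esc = previous char was an unconsumed backslash).
inductive PvState where
  | normal : PvState
  | slash : Nat → PvState
  | line : Nat → PvState
  | block : Nat → Bool → PvState
  | str : Nat → Char → Bool → PvState
deriving DecidableEq, Repr

-- Source B's _enter: the state entered when char c at pos is seen in plain code.
def bEnter (php tick : Bool) (pos : Nat) (c : Char) : PvState :=
  if c = '/' then .slash pos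
  else if php = true ∧ c = '#' then .line pos
  else if c = '\'' ∨ c = '"' ∨ (tick = true ∧ c = '`') then .str pos c false
  else .normal

-- Source B's for-loop over enumerate(text) (structural recursion on the remaining characters) plus the end-of-input flush.
def bRun (php tick : Bool) (pos : Nat) (st : PvState) (rest : List Char)
    (acc : List (Int × Int)) : List (Int × Int) :=
  match rest with
  | [] =>
    match st with
    | .line s => acc ++ [((s : Int), (pos : Int))]
    | .block s _ => acc ++ [((s : Int), (pos : Int))]
    | .str s _ _ => acc ++ [((s : Int), (pos : Int))]
    | _ => acc
  | c :: rest' =>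
    match st with
    | .normal => bRun php tick (pos + 1) (bEnter php tick pos c) rest' acc
    | .slash s =>
      if c = '/' then bRun php tick (pos + 1) (.line s) rest' acc
      else if c = '*' then bRun php tick (pos + 1) (.block s false) rest' acc
      else bRun php tick (pos + 1) (bEnter php tick pos c) rest' acc
    | .line s =>
      if c = '\n' then bRun php tick (pos + 1) .normal rest' (acc ++ [((s : Int), (pos : Int))])
      else bRun php tick (pos + 1) (.line s) rest' acc
    | .block s star =>
      if star = true ∧ c = '/' then
        bRun php tick (pos + 1) .normal rest' (acc ++ [((s : Int), ((pos + 1 : Nat) : Int))])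
      else bRun php tick (pos + 1) (.block s (c = '*')) rest' acc
    | .str s q esc =>
      if esc = true then bRun php tick (pos + 1) (.str s q false) rest' acc
      else if c = '\\' then bRun php tick (pos + 1) (.str s q true) rest' acc
      else if c = q then
        bRun php tick (pos + 1) .normal rest' (acc ++ [((s : Int), ((pos + 1 : Nat) : Int))])
      else bRun php tick (pos + 1) (.str s q esc) rest' acc

def compute_skip_spans_py_alt (text : String) (lang : String) : List (Int × Int) :=
  let ls := PySem.Chars.lower lang.toList
  bRun (decide (ls = ['p', 'h', 'p'])) (decide (ls = ['j', 's'] ∨ ls = ['g', 'o']))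
    0 .normal text.toList []

-- ===== PRECONDITION & SPEC =====
def Spec_compute_skip_spans_py (text : String) (lang : String) (out : List (Int × Int)) : Prop := out = compute_skip_spans_py_alt text lang
instance (text : String) (lang : String) (out : List (Int × Int)) : Decidable (Spec_compute_skip_spans_py text lang out) := by unfold Spec_compute_skip_spans_py; infer_instance

-- ===== CLAIM (what is proved, stated in full; the proofs are below) =====
def Claim_equal_compute_skip_spans_py : Prop := ∀ (text : String) (lang : String), Dom_compute_skip_spans_py text lang → Spec_compute_skip_spans_py text lang (compute_skip_spans_py text lang)

-- ===== LEMMAS AND PROOFS =====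

theorem aLoop_out (cs ls : List Char) (i : Nat) (spans : List (Int × Int))
    (h : ¬ i < cs.length) : aLoop cs ls i spans = spans := by
  rw [aLoop]; simp [h]

-- aScanLine stays within bounds and stops on a newline (or at the end).
theorem aScanLine_le (cs : List Char) (j : Nat) (h : j ≤ cs.length) : aScanLine cs j ≤ cs.length := by
  fun_induction aScanLine cs j <;> omega

theorem aScanLine_stop (cs : List Char) (j : Nat) (h : aScanLine cs j < cs.length) :
    cs[aScanLine cs j]? = some '\n' := by
  fun_induction aScanLine cs j with
  | case1 j hc ih => exact ih h
  | case2 j hc =>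
    rcases not_and_or.mp hc with h1 | h2
    · omega
    · simpa using h2

-- Running B's DFA from a line-comment state: it reaches A's scan end, emits the span, and resumes after the newline (or flushes at the end).
theorem run_line (php tick : Bool) (cs : List Char) (s : Nat) :
    ∀ p, p ≤ cs.length → ∀ acc, bRun php tick p (.line s) (cs.drop p) acc =
      (if aScanLine cs p < cs.length then
        bRun php tick (aScanLine cs p + 1) .normal (cs.drop (aScanLine cs p + 1))
          (acc ++ [((s : Int), ((aScanLine cs p : Nat) : Int))])
      else acc ++ [((s : Int), ((aScanLine cs p : Nat) : Int))]) := by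
  intro p hp
  induction hn : cs.length - p generalizing p with
  | zero =>
    intro acc
    have hple : p = cs.length := by omega
    subst hple
    rw [List.drop_eq_nil_of_le (le_refl _)]
    rw [aScanLine]
    simp [bRun]
  | succ n ih =>
    intro acc
    have hplt : p < cs.length := by omega
    rw [List.drop_eq_getElem_cons hplt]
    by_cases hnl : cs[p] = '\n'
    · have hstop : aScanLine cs p = p := by
        rw [aScanLine]; simp [List.getElem?_eq_getElem hplt, hnl]
      simp [bRun, hnl, hstop, hplt]
    · have hstep : aScanLine cs p = aScanLine cs (p + 1) := by
        rw [aScanLine]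
        simp [hplt, hnl]
      simp only [bRun, if_neg hnl]
      rw [ih (p + 1) (by omega) (by omega), hstep]

-- B's block-comment end position, extracted for the proofs.
def bBlockEnd (cs : List Char) (p : Nat) (star : Bool) : Nat :=
  if p < cs.length then
    if star = true ∧ cs[p]? = some '/' then p + 1
    else bBlockEnd cs (p + 1) (decide (cs[p]? = some '*'))
  else cs.length
termination_by cs.length - p
decreasing_by omega

theorem bBlockEnd_le (cs : List Char) (p : Nat) (star : Bool) : bBlockEnd cs p star ≤ cs.length := by
  fun_induction bBlockEnd cs p star <;> omega

-- Running B's DFA from a block-comment state emits (s, bBlockEnd) and resumes there.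
theorem run_block (php tick : Bool) (cs : List Char) (s : Nat) :
    ∀ p, p ≤ cs.length → ∀ star acc, bRun php tick p (.block s star) (cs.drop p) acc =
      bRun php tick (bBlockEnd cs p star) .normal (cs.drop (bBlockEnd cs p star))
        (acc ++ [((s : Int), ((bBlockEnd cs p star : Nat) : Int))]) := by
  intro p hp
  induction hn : cs.length - p generalizing p with
  | zero =>
    intro star acc
    have hple : p = cs.length := by omega
    subst hple
    rw [List.drop_eq_nil_of_le (le_refl _)]
    rw [bBlockEnd]
    simp [bRun]
  | succ n ih =>
    intro star acc
    have hplt : p < cs.length := by omega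
    have hget : cs[p]? = some cs[p] := List.getElem?_eq_getElem hplt
    rw [List.drop_eq_getElem_cons hplt]
    by_cases hcl : star = true ∧ cs[p] = '/'
    · obtain ⟨hs, hc⟩ := hcl
      subst hs
      have hend : bBlockEnd cs p true = p + 1 := by
        rw [bBlockEnd]; simp [hplt, hc]
      rw [hend]
      simp [bRun, hc]
    · have hX : ¬ (star = true ∧ cs[p]? = some '/') := by
        rw [hget]; simp only [Option.some.injEq]; exact hcl
      have hend : bBlockEnd cs p star = bBlockEnd cs (p + 1) (decide (cs[p] = '*')) := by
        rw [bBlockEnd]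
        rw [if_pos hplt, if_neg hX, hget]
        simp
      simp only [bRun, if_neg hcl]
      rw [ih (p + 1) (by omega) (by omega), hend]
  
-- bBlockEnd in terms of A's scan.
theorem bBlockEnd_eq (cs : List Char) : ∀ p star,
    bBlockEnd cs p star =
      if star = true ∧ cs[p]? = some '/' then p + 1
      else min cs.length (aScanBlock cs p + 2) := by
  intro p star
  induction hn : cs.length + 1 - p generalizing p star with
  | zero =>
    have hge : cs.length < p := by omega
    rw [bBlockEnd, aScanBlock]
    have h1 : ¬ p < cs.length := by omega
    have h2 : ¬ p + 1 < cs.length := by omega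
    simp [h1, h2]
    omega
  | succ n ih =>
    by_cases hplt : p < cs.length
    · have hget : cs[p]? = some cs[p] := List.getElem?_eq_getElem hplt
      rw [bBlockEnd, if_pos hplt]
      simp only [hget, Option.some.injEq]
      by_cases hcl : star = true ∧ cs[p] = '/'
      · obtain ⟨hs, hc⟩ := hcl
        subst hs
        simp [hc]
      · rw [if_neg hcl, if_neg hcl]
        rw [ih (p + 1) _ (by omega)]
        by_cases hc2 : cs[p] = '*' ∧ cs[p + 1]? = some '/'
        · have hlt : p + 1 < cs.length := by
            rcases Nat.lt_or_ge (p + 1) cs.length with h | h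
            · exact h
            · rw [List.getElem?_eq_none_iff.mpr h] at hc2
              simp at hc2
          have hA : aScanBlock cs p = p := by
            rw [aScanBlock]; simp [hget, hc2.1, hc2.2]
          rw [if_pos (by simp [hc2.1, hc2.2]), hA]
          omega
        · have hnc : ¬ (decide (cs[p] = '*') = true ∧ cs[p + 1]? = some '/') := by
            simpa using hc2
          rw [if_neg hnc]
          by_cases hlt : p + 1 < cs.length
          · have hA : aScanBlock cs p = aScanBlock cs (p + 1) := by
              rw [aScanBlock]
              rw [if_pos ⟨hlt, fun h => hc2 ⟨by rw [hget] at h; exact Option.some.inj h.1, h.2⟩⟩]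
            rw [hA]
          · have hA : aScanBlock cs p = p := by
              rw [aScanBlock]; simp [hlt]
            have hA2 : aScanBlock cs (p + 1) = p + 1 := by
              rw [aScanBlock]
              have h2 : ¬ (p + 1 + 1 < cs.length) := by omega
              simp [h2]
            rw [hA, hA2]
            omega
    · rw [bBlockEnd, aScanBlock]
      have h2 : ¬ p + 1 < cs.length := by omega
      simp [hplt, h2]
      omega

-- B's string end position, extracted for the proofs.
def bStrEnd (cs : List Char) (q : Char) (p : Nat) (esc : Bool) : Nat :=
  if p < cs.length then
    if esc = true then bStrEnd cs q (p + 1) false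
    else if cs[p]? = some '\\' then bStrEnd cs q (p + 1) true
    else if cs[p]? = some q then p + 1
    else bStrEnd cs q (p + 1) false
  else cs.length
termination_by cs.length - p
decreasing_by all_goals omega

-- Running B's DFA from a string state emits (s, bStrEnd) and resumes there.
theorem run_str (php tick : Bool) (cs : List Char) (s : Nat) (q : Char) :
    ∀ p, p ≤ cs.length → ∀ esc acc, bRun php tick p (.str s q esc) (cs.drop p) acc =
      bRun php tick (bStrEnd cs q p esc) .normal (cs.drop (bStrEnd cs q p esc))
        (acc ++ [((s : Int), ((bStrEnd cs q p esc : Nat) : Int))]) := by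
  intro p hp
  induction hn : cs.length - p generalizing p with
  | zero =>
    intro esc acc
    have hple : p = cs.length := by omega
    subst hple
    rw [List.drop_eq_nil_of_le (le_refl _)]
    rw [bStrEnd]
    simp [bRun]
  | succ n ih =>
    intro esc acc
    have hplt : p < cs.length := by omega
    have hget : cs[p]? = some cs[p] := List.getElem?_eq_getElem hplt
    rw [List.drop_eq_getElem_cons hplt]
    rw [bStrEnd, if_pos hplt]
    simp only [hget, Option.some.injEq]
    by_cases hesc : esc = true
    · subst hesc
      simp only [bRun]
      exact ih (p + 1) (by omega) (by omega) false acc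
    · have hesc' : esc = false := by cases esc <;> simp_all
      subst hesc'
      rw [if_neg (show ¬(false = true) from by decide)]
      by_cases hbs : cs[p] = '\\'
      · simp only [bRun, if_neg (show ¬(false = true) from by decide), if_pos hbs]
        exact ih (p + 1) (by omega) (by omega) true acc
      · rw [if_neg hbs]
        by_cases hq : cs[p] = q
        · simp only [bRun, if_neg (show ¬(false = true) from by decide), if_neg hbs, if_pos hq]
        · rw [if_neg hq]
          simp only [bRun, if_neg (show ¬(false = true) from by decide), if_neg hbs, if_neg hq]
          exact ih (p + 1) (by omega) (by omega) false acc

-- bStrEnd in terms of A's scan.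
theorem bStrEnd_eq (cs : List Char) (q : Char) :
    ∀ p, bStrEnd cs q p false = min cs.length (aScanStr cs q p) := by
  intro p
  fun_induction aScanStr cs q p with
  | case1 p h hbs ih =>
    rw [bStrEnd, if_pos h, if_neg (by simp), if_pos hbs]
    rw [bStrEnd]
    by_cases hlt : p + 1 < cs.length
    · rw [if_pos hlt, if_pos rfl]
      exact ih
    · rw [if_neg hlt]
      have : cs.length ≤ p + 2 := by omega
      have hA : aScanStr cs q (p + 2) = p + 2 := by
        rw [aScanStr]; simp; omega
      rw [hA]
      omega
  | case2 p h hbs hq =>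
    rw [bStrEnd, if_pos h, if_neg (by simp), if_neg hbs, if_pos hq]
    omega
  | case3 p h hbs hq ih =>
    rw [bStrEnd, if_pos h, if_neg (by simp), if_neg hbs, if_neg hq]
    exact ih
  | case4 p h =>
    rw [bStrEnd, if_neg h]
    omega

-- A's main loop ignores a newline and positions past the end.
theorem aLoop_newline (cs ls : List Char) (e : Nat) (spans : List (Int × Int))
    (he : e < cs.length) (hnl : cs[e]? = some '\n') :
    aLoop cs ls e spans = aLoop cs ls (e + 1) spans := by
  have hc : cs[e] = '\n' := by
    rw [List.getElem?_eq_getElem he] at hnl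
    exact Option.some.inj hnl
  rw [aLoop]
  simp [he, hc]

theorem aLoop_min (cs ls : List Char) (j : Nat) (spans : List (Int × Int)) :
    aLoop cs ls (min cs.length j) spans = aLoop cs ls j spans := by
  by_cases h : j ≤ cs.length
  · rw [Nat.min_eq_right h]
  · rw [Nat.min_eq_left (by omega)]
    rw [aLoop_out cs ls cs.length spans (by omega), aLoop_out cs ls j spans (by omega)]

-- One-step characterisations of A's main loop, one per branch.
theorem aLoop_step_lineslash (cs ls : List Char) (pos : Nat) (spans : List (Int × Int))
    (hlt : pos < cs.length) (h1 : cs[pos]? = some '/') (h2 : cs[pos + 1]? = some '/') :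
    aLoop cs ls pos spans =
      aLoop cs ls (aScanLine cs (pos + 2))
        (spans ++ [((pos : Int), ((aScanLine cs (pos + 2) : Nat) : Int))]) := by
  have hc1 : cs[pos] = '/' := by
    rw [List.getElem?_eq_getElem hlt] at h1
    exact Option.some.inj h1
  rw [aLoop]
  simp [hlt, hc1, h2]

theorem aLoop_step_hash (cs ls : List Char) (pos : Nat) (spans : List (Int × Int))
    (hlt : pos < cs.length) (hls : ls = ['p', 'h', 'p']) (h1 : cs[pos]? = some '#') :
    aLoop cs ls pos spans =
      aLoop cs ls (aScanLine cs (pos + 1))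
        (spans ++ [((pos : Int), ((aScanLine cs (pos + 1) : Nat) : Int))]) := by
  have hc1 : cs[pos] = '#' := by
    rw [List.getElem?_eq_getElem hlt] at h1
    exact Option.some.inj h1
  rw [aLoop]
  simp [hlt, hls, hc1]

theorem aLoop_step_block (cs ls : List Char) (pos : Nat) (spans : List (Int × Int))
    (hlt : pos < cs.length) (h1 : cs[pos]? = some '/') (h2 : cs[pos + 1]? = some '*') :
    aLoop cs ls pos spans =
      aLoop cs ls (min cs.length (aScanBlock cs (pos + 2) + 2))
        (spans ++ [((pos : Int), ((min cs.length (aScanBlock cs (pos + 2) + 2) : Nat) : Int))]) := by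
  have hc1 : cs[pos] = '/' := by
    rw [List.getElem?_eq_getElem hlt] at h1
    exact Option.some.inj h1
  rw [aLoop]
  simp [hlt, hc1, h2]

theorem aLoop_step_squote (cs ls : List Char) (pos : Nat) (spans : List (Int × Int))
    (hlt : pos < cs.length) (h1 : cs[pos]? = some '\'') :
    aLoop cs ls pos spans =
      aLoop cs ls (aScanStr cs '\'' (pos + 1))
        (spans ++ [((pos : Int), ((min cs.length (aScanStr cs '\'' (pos + 1)) : Nat) : Int))]) := by
  have hc1 : cs[pos] = '\'' := by
    rw [List.getElem?_eq_getElem hlt] at h1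
    exact Option.some.inj h1
  rw [aLoop]
  simp [hlt, hc1]

theorem aLoop_step_dquote (cs ls : List Char) (pos : Nat) (spans : List (Int × Int))
    (hlt : pos < cs.length) (h1 : cs[pos]? = some '"') :
    aLoop cs ls pos spans =
      aLoop cs ls (aScanStr cs '"' (pos + 1))
        (spans ++ [((pos : Int), ((min cs.length (aScanStr cs '"' (pos + 1)) : Nat) : Int))]) := by
  have hc1 : cs[pos] = '"' := by
    rw [List.getElem?_eq_getElem hlt] at h1
    exact Option.some.inj h1
  rw [aLoop]
  simp [hlt, hc1]

theorem aLoop_step_tick (cs ls : List Char) (pos : Nat) (spans : List (Int × Int))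
    (hlt : pos < cs.length) (h1 : cs[pos]? = some '`')
    (hls : ls = ['j', 's'] ∨ ls = ['g', 'o']) :
    aLoop cs ls pos spans =
      aLoop cs ls (aScanStr cs '`' (pos + 1))
        (spans ++ [((pos : Int), ((min cs.length (aScanStr cs '`' (pos + 1)) : Nat) : Int))]) := by
  have hc1 : cs[pos] = '`' := by
    rw [List.getElem?_eq_getElem hlt] at h1
    exact Option.some.inj h1
  rw [aLoop]
  simp [hlt, hc1, hls]

theorem aLoop_step_other (cs ls : List Char) (pos : Nat) (spans : List (Int × Int))
    (hlt : pos < cs.length)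
    (h1 : ¬(cs[pos]? = some '/' ∧ cs[pos + 1]? = some '/'))
    (h2 : ¬(ls = ['p', 'h', 'p'] ∧ cs[pos]? = some '#'))
    (h3 : ¬(cs[pos]? = some '/' ∧ cs[pos + 1]? = some '*'))
    (h4 : ¬(cs[pos]? = some '\'' ∨ cs[pos]? = some '"'))
    (h5 : ¬(cs[pos]? = some '`' ∧ (ls = ['j', 's'] ∨ ls = ['g', 'o']))) :
    aLoop cs ls pos spans = aLoop cs ls (pos + 1) spans := by
  rw [aLoop]
  simp only [dif_pos hlt, if_neg h1, if_neg h2, if_neg h3, if_neg h4, if_neg h5]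

-- The master lemma: B's DFA fold from plain state equals A's main loop.
theorem master (cs ls : List Char) (php tick : Bool)
    (hphp : php = decide (ls = ['p', 'h', 'p']))
    (htick : tick = decide (ls = ['j', 's'] ∨ ls = ['g', 'o'])) :
    ∀ k pos, cs.length - pos ≤ k → pos ≤ cs.length → ∀ acc,
      bRun php tick pos .normal (cs.drop pos) acc = aLoop cs ls pos acc := by
  have hphp' : (php = true) ↔ ls = ['p', 'h', 'p'] := by rw [hphp]; simp
  have htick' : (tick = true) ↔ (ls = ['j', 's'] ∨ ls = ['g', 'o']) := by rw [htick]; simp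
  intro k
  induction k with
  | zero =>
    intro pos hk hp acc
    have hple : pos = cs.length := by omega
    subst hple
    rw [List.drop_eq_nil_of_le (le_refl _), aLoop_out cs ls _ acc (by omega)]
    rfl
  | succ k ih =>
    intro pos hk hp acc
    by_cases hlt : pos < cs.length
    · have hget : cs[pos]? = some cs[pos] := List.getElem?_eq_getElem hlt
      rw [List.drop_eq_getElem_cons hlt]
      simp only [bRun, bEnter]
      by_cases hc : cs[pos] = '/'
      · rw [if_pos hc]
        by_cases h1 : pos + 1 < cs.length
        · have hget1 : cs[pos + 1]? = some cs[pos + 1] := List.getElem?_eq_getElem h1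
          rw [List.drop_eq_getElem_cons h1]
          simp only [bRun]
          by_cases h2 : cs[pos + 1] = '/'
          · rw [if_pos h2]
            have hr := run_line php tick cs pos (pos + 1 + 1) (by omega) acc
            rw [hr]
            rw [aLoop_step_lineslash cs ls pos acc hlt (by rw [hget, hc]) (by rw [hget1, h2])]
            have hel : aScanLine cs (pos + 2) ≤ cs.length := aScanLine_le cs _ (by omega)
            have heg : pos + 2 ≤ aScanLine cs (pos + 2) := aScanLine_ge cs _
            by_cases hfe : aScanLine cs (pos + 2) < cs.length
            · rw [if_pos hfe]
              rw [ih (aScanLine cs (pos + 2) + 1) (by omega) (by omega)]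
              rw [aLoop_newline cs ls _ _ hfe (aScanLine_stop cs _ hfe)]
            · rw [if_neg hfe]
              rw [aLoop_out cs ls _ _ (by omega)]
          · rw [if_neg h2]
            by_cases h3 : cs[pos + 1] = '*'
            · rw [if_pos h3]
              have hr := run_block php tick cs pos (pos + 1 + 1) (by omega) false acc
              rw [hr]
              rw [aLoop_step_block cs ls pos acc hlt (by rw [hget, hc]) (by rw [hget1, h3])]
              have hbe := bBlockEnd_eq cs (pos + 2) false
              simp only [Bool.false_eq_true, false_and, if_false] at hbe
              have hle : bBlockEnd cs (pos + 2) false ≤ cs.length := bBlockEnd_le cs _ _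
              have hgt : pos < bBlockEnd cs (pos + 2) false := by
                have := aScanBlock_ge cs (pos + 2)
                omega
              rw [hbe]
              rw [ih (min cs.length (aScanBlock cs (pos + 2) + 2)) (by omega) (by omega)]
            · rw [if_neg h3]
              have hr : bRun php tick (pos + 1 + 1) (bEnter php tick (pos + 1) cs[pos + 1])
                    (cs.drop (pos + 1 + 1)) acc =
                  bRun php tick (pos + 1) .normal (cs.drop (pos + 1)) acc := by
                rw [List.drop_eq_getElem_cons h1]
                rfl
              rw [hr, ih (pos + 1) (by omega) (by omega)]
              rw [aLoop_step_other cs ls pos acc hlt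
                (by rw [hget1]; simp [h2])
                (by rw [hget, hc]; simp)
                (by rw [hget1]; simp [h3])
                (by rw [hget, hc]; simp)
                (by rw [hget, hc]; simp)]
        · have hnone : cs[pos + 1]? = none := by rw [List.getElem?_eq_none_iff]; omega
          rw [List.drop_eq_nil_of_le (by omega : cs.length ≤ pos + 1)]
          rw [aLoop_step_other cs ls pos acc hlt
            (by rw [hnone]; simp)
            (by rw [hget, hc]; simp)
            (by rw [hnone]; simp)
            (by rw [hget, hc]; simp)
            (by rw [hget, hc]; simp)]
          rw [aLoop_out cs ls _ _ (by omega)]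
          rfl
      · rw [if_neg hc]
        by_cases hh : php = true ∧ cs[pos] = '#'
        · rw [if_pos hh]
          have hr := run_line php tick cs pos (pos + 1) (by omega) acc
          rw [hr]
          rw [aLoop_step_hash cs ls pos acc hlt (hphp'.mp hh.1) (by rw [hget, hh.2])]
          have hel : aScanLine cs (pos + 1) ≤ cs.length := aScanLine_le cs _ (by omega)
          have heg : pos + 1 ≤ aScanLine cs (pos + 1) := aScanLine_ge cs _
          by_cases hfe : aScanLine cs (pos + 1) < cs.length
          · rw [if_pos hfe]
            rw [ih (aScanLine cs (pos + 1) + 1) (by omega) (by omega)]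
            rw [aLoop_newline cs ls _ _ hfe (aScanLine_stop cs _ hfe)]
          · rw [if_neg hfe]
            rw [aLoop_out cs ls _ _ (by omega)]
        · rw [if_neg hh]
          by_cases hq : cs[pos] = '\'' ∨ cs[pos] = '"' ∨ (tick = true ∧ cs[pos] = '`')
          · rw [if_pos hq]
            have hr := run_str php tick cs pos cs[pos] (pos + 1) (by omega) false acc
            rw [hr, bStrEnd_eq cs cs[pos] (pos + 1)]
            have hsg : pos + 1 ≤ aScanStr cs cs[pos] (pos + 1) := aScanStr_ge cs _ _
            have hgt : pos < min cs.length (aScanStr cs cs[pos] (pos + 1)) := by omega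
            rw [ih (min cs.length (aScanStr cs cs[pos] (pos + 1))) (by omega) (by omega)]
            rw [aLoop_min]
            rcases hq with hq | hq | hq
            · rw [hq]
              exact (aLoop_step_squote cs ls pos acc hlt (by rw [hget, hq])).symm
            · rw [hq]
              exact (aLoop_step_dquote cs ls pos acc hlt (by rw [hget, hq])).symm
            · rw [hq.2]
              exact (aLoop_step_tick cs ls pos acc hlt (by rw [hget, hq.2])
                (htick'.mp hq.1)).symm
          · rw [if_neg hq]
            rw [ih (pos + 1) (by omega) (by omega)]
            push Not at hq
            rw [aLoop_step_other cs ls pos acc hlt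
              (by rw [hget]; simp [hc])
              (by rw [hget]; intro h; exact hh ⟨hphp'.mpr h.1, Option.some.inj h.2⟩)
              (by rw [hget]; simp [hc])
              (by rw [hget]; simp [hq.1, hq.2.1])
              (by rw [hget]; intro h; exact (hq.2.2 (htick'.mpr h.2)) (Option.some.inj h.1))]
    · have hple : pos = cs.length := by omega
      subst hple
      rw [List.drop_eq_nil_of_le (le_refl _), aLoop_out cs ls _ acc (by omega)]
      rfl

-- Lower bound on the start of any span B may still emit: the current state's start, or the position.
def stLB (st : PvState) (pos : Nat) : Nat :=
  match st with
  | .normal => pos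
  | .slash s => s
  | .line s => s
  | .block s _ => s
  | .str s _ _ => s

theorem bEnter_lb (php tick : Bool) (pos : Nat) (c : Char) :
    pos ≤ stLB (bEnter php tick pos c) (pos + 1) := by
  unfold bEnter
  split_ifs <;> simp [stLB]

theorem bEnter_ub (php tick : Bool) (pos : Nat) (c : Char) :
    stLB (bEnter php tick pos c) (pos + 1) ≤ pos + 1 := by
  unfold bEnter
  split_ifs <;> simp [stLB]

-- Every span B emits starts strictly after all accumulated spans, so the output is lexicographically sorted.
theorem bRun_pairwise (php tick : Bool) :
    ∀ (rest : List Char) (pos : Nat) (st : PvState) (acc : List (Int × Int)),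
      acc.Pairwise (fun a b => (toLex a : Lex (Int × Int)) < toLex b) →
      (∀ x ∈ acc, x.1 < ((stLB st pos : Nat) : Int)) →
      stLB st pos ≤ pos →
      (bRun php tick pos st rest acc).Pairwise
        (fun a b => (toLex a : Lex (Int × Int)) < toLex b) := by
  intro rest
  induction rest with
  | nil =>
    intro pos st acc hpw hlb hle
    cases st with
    | normal => exact hpw
    | slash s => exact hpw
    | line s =>
      refine List.pairwise_append.mpr ⟨hpw, List.pairwise_singleton _ _, ?_⟩
      intro x hx y hy
      rw [List.mem_singleton] at hy
      subst hy
      exact Prod.Lex.toLex_lt_toLex.mpr (Or.inl (hlb x hx))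
    | block s star =>
      refine List.pairwise_append.mpr ⟨hpw, List.pairwise_singleton _ _, ?_⟩
      intro x hx y hy
      rw [List.mem_singleton] at hy
      subst hy
      exact Prod.Lex.toLex_lt_toLex.mpr (Or.inl (hlb x hx))
    | str s q esc =>
      refine List.pairwise_append.mpr ⟨hpw, List.pairwise_singleton _ _, ?_⟩
      intro x hx y hy
      rw [List.mem_singleton] at hy
      subst hy
      exact Prod.Lex.toLex_lt_toLex.mpr (Or.inl (hlb x hx))
  | cons c rest ih =>
    intro pos st acc hpw hlb hle
    cases st with
    | normal =>
      refine ih (pos + 1) (bEnter php tick pos c) acc hpw ?_ (bEnter_ub php tick pos c)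
      intro x hx
      have h := hlb x hx
      have h2 := bEnter_lb php tick pos c
      simp [stLB] at h
      omega
    | slash s =>
      simp only [bRun]
      split_ifs with h1 h2
      · exact ih (pos + 1) (.line s) acc hpw hlb (by simp [stLB] at hle ⊢; omega)
      · exact ih (pos + 1) (.block s false) acc hpw hlb (by simp [stLB] at hle ⊢; omega)
      · refine ih (pos + 1) (bEnter php tick pos c) acc hpw ?_ (bEnter_ub php tick pos c)
        intro x hx
        have h := hlb x hx
        have h2 := bEnter_lb php tick pos c
        simp [stLB] at h hle
        omega
    | line s =>
      simp only [bRun]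
      split_ifs with h1
      · refine ih (pos + 1) .normal _ ?_ ?_ ?_
        · refine List.pairwise_append.mpr ⟨hpw, List.pairwise_singleton _ _, ?_⟩
          intro x hx y hy
          rw [List.mem_singleton] at hy
          subst hy
          exact Prod.Lex.toLex_lt_toLex.mpr (Or.inl (hlb x hx))
        · intro x hx
          rw [List.mem_append] at hx
          rcases hx with hx | hx
          · have h := hlb x hx
            simp [stLB] at h hle ⊢
            omega
          · rw [List.mem_singleton] at hx
            subst hx
            simp [stLB] at hle ⊢
            omega
        · simp [stLB]
      · exact ih (pos + 1) (.line s) acc hpw hlb (by simp [stLB] at hle ⊢; omega)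
    | block s star =>
      simp only [bRun]
      split_ifs with h1
      · refine ih (pos + 1) .normal _ ?_ ?_ ?_
        · refine List.pairwise_append.mpr ⟨hpw, List.pairwise_singleton _ _, ?_⟩
          intro x hx y hy
          rw [List.mem_singleton] at hy
          subst hy
          exact Prod.Lex.toLex_lt_toLex.mpr (Or.inl (hlb x hx))
        · intro x hx
          rw [List.mem_append] at hx
          rcases hx with hx | hx
          · have h := hlb x hx
            simp [stLB] at h hle ⊢
            omega
          · rw [List.mem_singleton] at hx
            subst hx
            simp [stLB] at hle ⊢
            omega
        · simp [stLB]
      · exact ih (pos + 1) (.block s (decide (c = '*'))) acc hpw hlb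
          (by simp [stLB] at hle ⊢; omega)
    | str s q esc =>
      simp only [bRun]
      split_ifs with h1 h2 h3
      · exact ih (pos + 1) (.str s q false) acc hpw hlb (by simp [stLB] at hle ⊢; omega)
      · exact ih (pos + 1) (.str s q true) acc hpw hlb (by simp [stLB] at hle ⊢; omega)
      · refine ih (pos + 1) .normal _ ?_ ?_ ?_
        · refine List.pairwise_append.mpr ⟨hpw, List.pairwise_singleton _ _, ?_⟩
          intro x hx y hy
          rw [List.mem_singleton] at hy
          subst hy
          exact Prod.Lex.toLex_lt_toLex.mpr (Or.inl (hlb x hx))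
        · intro x hx
          rw [List.mem_append] at hx
          rcases hx with hx | hx
          · have h := hlb x hx
            simp [stLB] at h hle ⊢
            omega
          · rw [List.mem_singleton] at hx
            subst hx
            simp [stLB] at hle ⊢
            omega
        · simp [stLB]
      · exact ih (pos + 1) (.str s q esc) acc hpw hlb (by simp [stLB] at hle ⊢; omega)




-- ===== VERDICT (by name: the statement is the Claim_ definition above) =====
theorem compute_skip_spans_py_spec : Claim_equal_compute_skip_spans_py := by
  intro text lang _
  unfold Spec_compute_skip_spans_py compute_skip_spans_py compute_skip_spans_py_alt
  have hm := master text.toList (PySem.Chars.lower lang.toList)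
    (decide (PySem.Chars.lower lang.toList = ['p', 'h', 'p']))
    (decide (PySem.Chars.lower lang.toList = ['j', 's'] ∨ PySem.Chars.lower lang.toList = ['g', 'o']))
    rfl rfl text.toList.length 0 (by omega) (by omega) []
  rw [List.drop_zero] at hm
  rw [← hm]
  apply PySem.List.sorted_eq_self_of_pairwise
  refine List.Pairwise.imp (fun h => le_of_lt h) ?_
  exact bRun_pairwise _ _ text.toList 0 .normal [] (List.Pairwise.nil) (by simp) (by simp [stLB])
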